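-- pv_equiv track=rewrite | github.com/Pepedrm/Practica2TDMD | ejercicio3.py | es_continua
-- ===== SOURCE A (Python) =====
-- def es_dirigido(P, R, A):
--     """Verifica si el subconjunto A es dirigido bajo la relación R."""
--     for i in range(len(A)):
--         for j in range(i + 1, len(A)):
--             a, b = A[i], A[j]
--             encontrado_mayor_comun_superior = False
--             for c in P:
--                 if (a, c) in R and (b, c) in R:
--                     encontrado_mayor_comun_superior = True
--                     break
--             if not encontrado_mayor_comun_superior:
--                 return False
--     return True
--
-- def encontrar_supremo(P, R, A):
--     """Encuentra el supremo de un subconjunto dirigido A bajo la relación R."""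
--     posibles_supremos = []
--     for c in P:
--         if all((a, c) in R for a in A):
--             posibles_supremos.append(c)
--
--     if not posibles_supremos:
--         return None
--
--     supremo = posibles_supremos[0]
--     for s in posibles_supremos:
--         if (s, supremo) in R and s != supremo:
--             supremo = s
--     return supremo
--
-- def es_continua(P, R, f):
--     """Verifica si la función f es continua en el poset P."""
--     for tamano_subconjunto in range(2, len(P) + 1):
--         subconjuntos_dirigidos = []
--
--         # Generar todos los subconjuntos dirigidos de tamaño tamano_subconjunto
--         for i in range(len(P)):
--             A = P[i:i+tamano_subconjunto]
--             if len(A) == tamano_subconjunto and es_dirigido(P, R, A):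
--                 subconjuntos_dirigidos.append(A)
--
--         # Verificar la condición de continuidad para cada subconjunto dirigido A
--         for A in subconjuntos_dirigidos:
--             supremo_A = encontrar_supremo(P, R, A)
--             supremo_f_A = encontrar_supremo(P, R, [f[a] for a in A])
--             if f[supremo_A] != supremo_f_A:
--                 return False
--
--     return True
-- ===== SOURCE B (Python) =====
-- def es_continua(P, R, f):
--     """Sliding-extension strategy: for each start index grow the window one
--     element at a time, checking only the new element's pairs against the old
--     window, intersecting common-upper-bound sets incrementally, and
--     abandoning the start as soon as a window stops being directed (any longer
--     window contains the failing pair, so it cannot be directed either)."""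
--     Rs = set(R)
--     n = len(P)
--
--     def ub(x):
--         return {c for c in P if (x, c) in Rs}
--
--     def pick(common):
--         cands = [c for c in P if c in common]
--         if not cands:
--             return None
--         s = cands[0]
--         for c in cands:
--             if (c, s) in Rs and c != s:
--                 s = c
--         return s
--
--     for i in range(n):
--         window = [P[i]]
--         common = ub(P[i])
--         for j in range(i + 1, n):
--             x = P[j]
--             if not all(not ub(a).isdisjoint(ub(x)) for a in window):
--                 break
--             window = window + [x]
--             common = common & ub(x)
--             s = pick(common)
--             fcommon = None
--             for a in window:
--                 u = ub(f[a])
--                 fcommon = u if fcommon is None else fcommon & u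
--             if f[s] != pick(fcommon):
--                 return False
--     return True
-- ===== Notes on version B (the rewrite author's own statement) =====
-- stated objective: faster
-- what changed: Instead of A's size-then-start enumeration that re-verifies directedness of every window pair-by-pair with a scan of P and recomputes suprema from scratch, B slides a growing window per start index, checks only the new element's pairs, maintains the common-upper-bound set by incremental intersection, and abandons a start as soon as a window stops being directed (a longer window contains the failing pair).
import Mathlib
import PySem

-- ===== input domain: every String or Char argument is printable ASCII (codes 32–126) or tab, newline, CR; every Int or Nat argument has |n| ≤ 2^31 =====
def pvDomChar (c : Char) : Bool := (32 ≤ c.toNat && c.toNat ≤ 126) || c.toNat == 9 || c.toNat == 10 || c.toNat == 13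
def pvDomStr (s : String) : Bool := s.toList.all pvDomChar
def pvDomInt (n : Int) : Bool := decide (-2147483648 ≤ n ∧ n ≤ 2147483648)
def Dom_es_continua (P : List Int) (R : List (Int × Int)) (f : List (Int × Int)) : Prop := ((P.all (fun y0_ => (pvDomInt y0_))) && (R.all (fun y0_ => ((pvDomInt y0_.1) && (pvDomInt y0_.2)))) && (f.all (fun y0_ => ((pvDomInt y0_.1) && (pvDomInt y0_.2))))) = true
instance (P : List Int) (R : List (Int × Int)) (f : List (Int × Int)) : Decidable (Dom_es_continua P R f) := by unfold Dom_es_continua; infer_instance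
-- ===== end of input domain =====

-- B replaces A's size-then-start enumeration (directedness recomputed from scratch on
-- every window) by a per-start sliding extension: only the new element's pairs are
-- checked, common-upper-bound sets are intersected incrementally, and a start is
-- abandoned as soon as a window stops being directed. Objective = faster.

-- ===== PORT A =====
def es_dirigido (P : List Int) (R : List (Int × Int)) (A : List Int) : Bool :=
  (PySem.List.pyRange 0 (A.length : Int) 1).all fun i =>
    (PySem.List.pyRange (i + 1) (A.length : Int) 1).all fun j =>
      let a := PySem.List.pyGetD A i 0
      let b := PySem.List.pyGetD A j 0
      -- the c-loop with break ≡ any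
      P.any fun c => R.contains (a, c) && R.contains (b, c)

def encontrar_supremo (P : List Int) (R : List (Int × Int)) (A : List Int) : Option Int :=
  let posibles := P.filter fun c => A.all fun a => R.contains (a, c)
  match posibles with
  | [] => none
  | s0 :: _ =>
    some (posibles.foldl (fun sup s => if R.contains (s, sup) && !(s == sup) then s else sup) s0)

def es_continua (P : List Int) (R : List (Int × Int)) (f : List (Int × Int)) : Bool :=
  (PySem.List.pyRange 2 ((P.length : Int) + 1) 1).all fun t =>
    let subs := (PySem.List.pyRange 0 (P.length : Int) 1).filterMap fun i =>
      let A := PySem.List.slice P (some i) (some (i + t))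
      if ((A.length : Int) == t) && es_dirigido P R A then some A else none
    subs.all fun A =>
      match encontrar_supremo P R A with
      | none => false   -- Python raises f[None] here; excluded by Pre_
      | some s =>
        some ((PySem.Dict.ofList f).getD s 0) ==
          encontrar_supremo P R (A.map fun a => (PySem.Dict.ofList f).getD a 0)

-- ===== PORT B =====
def bRs (R : List (Int × Int)) : PySem.Set (Int × Int) := PySem.Set.ofList R

def bUb (P : List Int) (R : List (Int × Int)) (x : Int) : PySem.Set Int :=
  PySem.Set.ofList (P.filter fun c => PySem.Set.contains (bRs R) (x, c))

def bPick (P : List Int) (R : List (Int × Int)) (common : PySem.Set Int) : Option Int :=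
  let cands := P.filter fun c => PySem.Set.contains common c
  match cands with
  | [] => none
  | c0 :: _ =>
    some (cands.foldl (fun s c => if PySem.Set.contains (bRs R) (c, s) && !(c == s) then c else s) c0)

-- the inner 'for j in range(i+1, n)' loop with break, as recursion over the suffix P[i+1:]
def bLoop (P : List Int) (R : List (Int × Int)) (fd : PySem.Dict Int Int)
    (window : List Int) (common : PySem.Set Int) : List Int → Bool
  | [] => true
  | x :: rest =>
    if window.all (fun a => !(PySem.Set.isdisjoint (bUb P R a) (bUb P R x))) then
      let window' := window ++ [x]
      let common' := PySem.Set.inter common (bUb P R x)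
      (match bPick P R common' with
       | none => false   -- Python raises f[None] here; excluded by Pre_
       | some s =>
         -- the fcommon = None-start intersection loop over the window
         match window'.foldl (fun acc a =>
             match acc with
             | none => some (bUb P R (fd.getD a 0))
             | some t => some (PySem.Set.inter t (bUb P R (fd.getD a 0)))) none with
         | none => false   -- unreachable: window' is nonempty
         | some fc => some (fd.getD s 0) == bPick P R fc)
      && bLoop P R fd window' common' rest
    else true   -- break: no longer window from this start is directed

def es_continua_alt (P : List Int) (R : List (Int × Int)) (f : List (Int × Int)) : Bool :=
  (PySem.List.pyRange 0 (P.length : Int) 1).all fun i =>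
    bLoop P R (PySem.Dict.ofList f) [PySem.List.pyGetD P i 0]
      (bUb P R (PySem.List.pyGetD P i 0)) (PySem.List.slice P (some (i + 1)) none)

-- ===== PRECONDITION & SPEC =====
-- Pre_ excludes inputs on which Python A raises a KeyError: a directed contiguous window
-- whose set of common upper bounds in P is empty (then f[None]), or containing an element
-- (or having a common upper bound reachable as supremo) that is not a key of f.
def winPre (P : List Int) (R : List (Int × Int)) (f : List (Int × Int)) (A : List Int) : Prop :=
  (∀ p ∈ List.range A.length, ∀ q ∈ List.range A.length, p < q →
      ∃ c ∈ P, (A.getD p 0, c) ∈ R ∧ (A.getD q 0, c) ∈ R) →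
    (∃ c ∈ P, ∀ a ∈ A, (a, c) ∈ R) ∧
    (∀ a ∈ A, (PySem.Dict.ofList f).contains a = true) ∧
    (∀ c ∈ P, (∀ a ∈ A, (a, c) ∈ R) → (PySem.Dict.ofList f).contains c = true)

def Pre_es_continua (P : List Int) (R : List (Int × Int)) (f : List (Int × Int)) : Prop :=
  ∀ t ∈ List.range (P.length + 1), ∀ i ∈ List.range (P.length + 1),
    2 ≤ t → i + t ≤ P.length → winPre P R f ((P.drop i).take t)

instance (P : List Int) (R : List (Int × Int)) (f : List (Int × Int)) : Decidable (Pre_es_continua P R f) := by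
  unfold Pre_es_continua winPre; infer_instance

def pvWitness_es_continua : List Int × (List (Int × Int)) × (List (Int × Int)) :=
  ([1, 2], [(1, 2), (2, 2)], [(1, 1), (2, 2)])

def Spec_es_continua (P : List Int) (R : List (Int × Int)) (f : List (Int × Int)) (out : Bool) : Prop := out = es_continua_alt P R f
instance (P : List Int) (R : List (Int × Int)) (f : List (Int × Int)) (out : Bool) : Decidable (Spec_es_continua P R f out) := by unfold Spec_es_continua; infer_instance

-- ===== CLAIM (what is proved, stated in full; the proofs are below) =====
def Claim_equal_es_continua : Prop := ∀ (P : List Int) (R : List (Int × Int)) (f : List (Int × Int)), Dom_es_continua P R f → Pre_es_continua P R f → Spec_es_continua P R f (es_continua P R f)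

-- ===== LEMMAS AND PROOFS =====

-- semantic vocabulary shared by the two characterisations
def Cub (P : List Int) (R : List (Int × Int)) (a b : Int) : Prop :=
  ∃ c, c ∈ P ∧ (a, c) ∈ R ∧ (b, c) ∈ R

def condV (P : List Int) (R : List (Int × Int)) (fd : PySem.Dict Int Int) (A : List Int) : Bool :=
  match encontrar_supremo P R A with
  | none => false
  | some s => some (fd.getD s 0) == encontrar_supremo P R (A.map fun a => fd.getD a 0)

theorem bool_eq_of_iff {a b : Bool} (h : a = true ↔ b = true) : a = b := by
  cases a <;> cases b <;> simp_all

theorem all_filterMap {α β : Type} (l : List α) (g : α → Option β) (p : β → Bool) :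
    (l.filterMap g).all p = l.all (fun x => (g x).all p) := by
  induction l with
  | nil => rfl
  | cons x l ih =>
    rw [List.filterMap_cons, List.all_cons, ← ih]
    cases g x <;> simp

theorem rs_contains_eq (R : List (Int × Int)) (p : Int × Int) :
    PySem.Set.contains (bRs R) p = R.contains p := by
  apply bool_eq_of_iff
  simp [bRs, PySem.Set.contains_iff, PySem.Set.mem_ofList]

theorem mem_bUb (P : List Int) (R : List (Int × Int)) (v x : Int) :
    x ∈ bUb P R v ↔ x ∈ P ∧ (v, x) ∈ R := by
  unfold bUb
  simp [bRs, PySem.Set.mem_ofList, List.mem_filter]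

theorem bPick_eq (P : List Int) (R : List (Int × Int)) (common : PySem.Set Int) (A : List Int)
    (h : ∀ c, c ∈ common ↔ c ∈ P ∧ ∀ a ∈ A, (a, c) ∈ R) :
    bPick P R common = encontrar_supremo P R A := by
  unfold bPick encontrar_supremo
  have hf : (P.filter fun c => PySem.Set.contains common c) =
      P.filter fun c => A.all fun a => R.contains (a, c) := by
    apply List.filter_congr
    intro c hc
    apply bool_eq_of_iff
    simp [PySem.Set.contains_iff, h, hc, List.all_eq_true]
  rw [hf]
  simp only [rs_contains_eq]

theorem mem_foldl_inter (g : Int → PySem.Set Int) :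
    ∀ (l : List Int) (s : PySem.Set Int) (x : Int),
    x ∈ l.foldl (fun acc v => PySem.Set.inter acc (g v)) s ↔
      x ∈ s ∧ ∀ v ∈ l, x ∈ g v := by
  intro l
  induction l with
  | nil => simp
  | cons v l ih =>
    intro s x
    rw [List.foldl_cons, ih]
    simp only [PySem.Set.mem_inter, List.mem_cons]
    constructor
    · rintro ⟨⟨hs, hv⟩, hl⟩
      exact ⟨hs, by rintro u (rfl | hu); exact hv; exact hl u hu⟩
    · rintro ⟨hs, h⟩
      exact ⟨⟨hs, h v (Or.inl rfl)⟩, fun u hu => h u (Or.inr hu)⟩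

theorem optfold_eq (g : Int → PySem.Set Int) :
    ∀ (l : List Int) (s : PySem.Set Int),
    l.foldl (fun acc a =>
        match acc with
        | none => some (g a)
        | some t => some (PySem.Set.inter t (g a))) (some s) =
      some (l.foldl (fun t a => PySem.Set.inter t (g a)) s) := by
  intro l
  induction l with
  | nil => intro s; rfl
  | cons a l ih => intro s; rw [List.foldl_cons, List.foldl_cons]; exact ih _

theorem pairsOK_iff (P : List Int) (R : List (Int × Int)) (w : List Int) (x : Int) :
    (w.all fun a => !(PySem.Set.isdisjoint (bUb P R a) (bUb P R x))) = true ↔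
      ∀ a ∈ w, Cub P R a x := by
  rw [List.all_eq_true]
  refine forall₂_congr fun a _ => ?_
  rw [Bool.not_eq_true', ← Bool.not_eq_true, PySem.Set.isdisjoint_iff]
  push_neg
  constructor
  · rintro ⟨c, hca, hcx⟩
    rw [mem_bUb] at hca hcx
    exact ⟨c, hca.1, hca.2, hcx.2⟩
  · rintro ⟨c, hc, h1, h2⟩
    exact ⟨c, (mem_bUb P R a c).mpr ⟨hc, h1⟩, (mem_bUb P R x c).mpr ⟨hc, h2⟩⟩

theorem es_dirigido_iff (P : List Int) (R : List (Int × Int)) (A : List Int) :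
    es_dirigido P R A = true ↔ A.Pairwise (Cub P R) := by
  unfold es_dirigido
  rw [List.pairwise_iff_getElem]
  simp only [List.all_eq_true]
  constructor
  · intro h p q hp hq hpq
    have hp' : (p : Int) ∈ PySem.List.pyRange 0 (A.length : Int) 1 := by
      rw [PySem.List.mem_pyRange_one]; omega
    have hq' : (q : Int) ∈ PySem.List.pyRange ((p : Int) + 1) (A.length : Int) 1 := by
      rw [PySem.List.mem_pyRange_one]; omega
    have := h _ hp' _ hq'
    simp only [PySem.List.pyGetD_natCast, List.getD_eq_getElem?_getD,
      List.getElem?_eq_getElem hp, List.getElem?_eq_getElem hq, Option.getD_some,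
      List.any_eq_true, Bool.and_eq_true, List.contains_iff_mem] at this
    obtain ⟨c, hc, h1, h2⟩ := this
    exact ⟨c, hc, h1, h2⟩
  · intro h i hi j hj
    rw [PySem.List.mem_pyRange_one] at hi hj
    obtain ⟨p, rfl⟩ := Int.eq_ofNat_of_zero_le hi.1
    obtain ⟨q, rfl⟩ := Int.eq_ofNat_of_zero_le (by omega : (0:Int) ≤ j)
    have hp : p < A.length := by exact_mod_cast lt_of_lt_of_le (by exact_mod_cast hi.2) le_rfl
    have hq : q < A.length := by exact_mod_cast hj.2
    have hpq : p < q := by exact_mod_cast (by omega : ((p:Int)) < (q:Int))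
    obtain ⟨c, hc, h1, h2⟩ := h p q hp hq hpq
    simp only [PySem.List.pyGetD_natCast, List.getD_eq_getElem?_getD,
      List.getElem?_eq_getElem hp, List.getElem?_eq_getElem hq, Option.getD_some,
      List.any_eq_true, Bool.and_eq_true, List.contains_iff_mem]
    exact ⟨c, hc, h1, h2⟩

-- characterisation of port A
theorem A_char (P : List Int) (R : List (Int × Int)) (f : List (Int × Int)) :
    es_continua P R f = true ↔
      ∀ (t i : Nat), 2 ≤ t → i + t ≤ P.length →
        ((P.drop i).take t).Pairwise (Cub P R) →
        condV P R (PySem.Dict.ofList f) ((P.drop i).take t) = true := by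
  unfold es_continua
  simp only [all_filterMap, List.all_eq_true]
  constructor
  · intro h t i h2 hit hdir
    have ht : (t : Int) ∈ PySem.List.pyRange 2 ((P.length : Int) + 1) 1 := by
      rw [PySem.List.mem_pyRange_one]; omega
    have hi : (i : Int) ∈ PySem.List.pyRange 0 (P.length : Int) 1 := by
      rw [PySem.List.mem_pyRange_one]; omega
    have := h _ ht _ hi
    rw [PySem.List.slice_natCast_add] at this
    have hlen : ((P.drop i).take t).length = t := by
      simp only [List.length_take, List.length_drop]; omega
    rw [if_pos (by simp [hlen, (es_dirigido_iff P R _).mpr hdir])] at this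
    simpa [condV] using this
  · intro h tI htmem iI himem
    rw [PySem.List.mem_pyRange_one] at htmem himem
    obtain ⟨t, rfl⟩ := Int.eq_ofNat_of_zero_le (by omega : (0:Int) ≤ tI)
    obtain ⟨i, rfl⟩ := Int.eq_ofNat_of_zero_le himem.1
    rw [PySem.List.slice_natCast_add]
    cases hcond : (((((P.drop i).take t).length : Int) == (t : Int))
        && es_dirigido P R ((P.drop i).take t)) with
    | true =>
      rw [if_pos rfl]
      rw [Bool.and_eq_true, beq_iff_eq] at hcond
      have hlen : ((P.drop i).take t).length = t := by exact_mod_cast hcond.1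
      have hit : i + t ≤ P.length := by
        simp only [List.length_take, List.length_drop] at hlen; omega
      have h2 : 2 ≤ t := by exact_mod_cast htmem.1
      have := h t i h2 hit ((es_dirigido_iff P R _).mp hcond.2)
      simpa [condV] using this
    | false => rw [if_neg (by simp)]; rfl

-- facts used by the bLoop characterisation
theorem drop_cons_facts (P : List Int) (k : Nat) (x : Int) (rest : List Int)
    (h : P.drop k = x :: rest) :
    k < P.length ∧ (∀ hk : k < P.length, P[k] = x) ∧ rest = P.drop (k + 1) := by
  have hlen : P.length - k = rest.length + 1 := by
    have := congrArg List.length h; simpa [List.length_drop] using this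
  have hk : k < P.length := by omega
  refine ⟨hk, ?_, ?_⟩
  · intro _
    have : (P.drop k)[0]'(by rw [h]; simp) = x := by simp [h]
    simpa [List.getElem_drop] using this
  · have := congrArg List.tail h
    simpa [List.tail_drop] using this.symm

-- the sliding-extension loop of B checks exactly the directed extensions of its window
theorem bLoop_iff (P : List Int) (R : List (Int × Int)) (fd : PySem.Dict Int Int) :
    ∀ (rest window : List Int) (common : PySem.Set Int) (i t : Nat),
      window = (P.drop i).take t → window.length = t → 1 ≤ t →
      rest = P.drop (i + t) →
      (∀ c, c ∈ common ↔ c ∈ P ∧ ∀ a ∈ window, (a, c) ∈ R) →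
      window.Pairwise (Cub P R) →
      (bLoop P R fd window common rest = true ↔
        ∀ t', t < t' → i + t' ≤ P.length →
          ((P.drop i).take t').Pairwise (Cub P R) →
          condV P R fd ((P.drop i).take t') = true) := by
  intro rest
  induction rest with
  | nil =>
    intro window common i t hw hwl ht hrest hcom hpw
    have hlen : P.length ≤ i + t := by
      have := congrArg List.length hrest
      simp only [List.length_drop, List.length_nil] at this; omega
    simp only [bLoop, true_iff]
    intro t' ht' hle _
    omega
  | cons x rest' ih =>
    intro window common i t hw hwl ht hrest hcom hpw
    obtain ⟨hik, hx, hrest'⟩ := drop_cons_facts P (i + t) x rest' hrest.symm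
    have hx' : P[i + t]'hik = x := hx hik
    have hwin' : window ++ [x] = (P.drop i).take (t + 1) := by
      rw [List.take_succ, ← hw]
      have : (P.drop i)[t]? = some x := by
        rw [List.getElem?_eq_getElem (by simp [List.length_drop]; omega)]
        simp [List.getElem_drop, hx']
      simp [this]
    simp only [bLoop]
    by_cases hok : (window.all fun a => !(PySem.Set.isdisjoint (bUb P R a) (bUb P R x))) = true
    · rw [if_pos hok]
      have hcub : ∀ a ∈ window, Cub P R a x := (pairsOK_iff P R window x).mp hok
      have hpw' : (window ++ [x]).Pairwise (Cub P R) := by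
        rw [List.pairwise_append]
        exact ⟨hpw, by simp, by simpa using hcub⟩
      have hcom' : ∀ c, c ∈ PySem.Set.inter common (bUb P R x) ↔
          c ∈ P ∧ ∀ a ∈ window ++ [x], (a, c) ∈ R := by
        intro c
        rw [PySem.Set.mem_inter, hcom, mem_bUb]
        constructor
        · rintro ⟨⟨hc, hall⟩, -, hx2⟩
          refine ⟨hc, ?_⟩
          intro a ha
          rcases List.mem_append.mp ha with ha | ha
          · exact hall a ha
          · simp at ha; subst ha; exact hx2
        · rintro ⟨hc, hall⟩
          exact ⟨⟨hc, fun a ha => hall a (List.mem_append.mpr (Or.inl ha))⟩, hc,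
            hall x (by simp)⟩
      -- the computed condition equals condV of the extended window
      have hcondeq :
          (match bPick P R (PySem.Set.inter common (bUb P R x)) with
           | none => false
           | some s =>
             match (window ++ [x]).foldl (fun acc a =>
                 match acc with
                 | none => some (bUb P R (fd.getD a 0))
                 | some t => some (PySem.Set.inter t (bUb P R (fd.getD a 0)))) none with
             | none => false
             | some fc => some (fd.getD s 0) == bPick P R fc) =
          condV P R fd (window ++ [x]) := by
        obtain ⟨w0, wr, hw0⟩ : ∃ w0 wr, window = w0 :: wr := by
          cases window with
          | nil => simp at hwl; omega
          | cons w0 wr => exact ⟨w0, wr, rfl⟩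
        have hsup1 : bPick P R (PySem.Set.inter common (bUb P R x)) =
            encontrar_supremo P R (window ++ [x]) := bPick_eq _ _ _ _ hcom'
        rw [hsup1]
        unfold condV
        cases hs : encontrar_supremo P R (window ++ [x]) with
        | none => rfl
        | some s =>
          simp only [hw0, List.cons_append, List.foldl_cons]
          rw [optfold_eq]
          have hsup2 : bPick P R ((wr ++ [x]).foldl
              (fun t a => PySem.Set.inter t (bUb P R (fd.getD a 0))) (bUb P R (fd.getD w0 0))) =
              encontrar_supremo P R (((w0 :: wr) ++ [x]).map fun a => fd.getD a 0) := by
            apply bPick_eq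
            intro c
            rw [mem_foldl_inter, mem_bUb]
            constructor
            · rintro ⟨⟨hc, h0⟩, hrest⟩
              refine ⟨hc, ?_⟩
              rw [List.forall_mem_map]
              intro a ha
              rcases List.mem_cons.mp ha with rfl | ha
              · exact h0
              · exact ((mem_bUb P R _ c).mp (hrest a ha)).2
            · rintro ⟨hc, hall⟩
              rw [List.forall_mem_map] at hall
              refine ⟨⟨hc, hall w0 (by simp)⟩, ?_⟩
              intro a ha
              exact (mem_bUb P R _ c).mpr ⟨hc, hall a (List.mem_cons.mpr (Or.inr ha))⟩
          simp only [hsup2]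
          simp
      rw [Bool.and_eq_true, hcondeq,
        ih (window ++ [x]) _ i (t + 1) hwin' (by simp [hwl]) (by omega)
          (by rw [hrest', Nat.add_assoc]) hcom' hpw']
      constructor
      · rintro ⟨hc, hrest⟩ t' ht' hle hpw2
        rcases Nat.lt_or_ge (t + 1) t' with h1 | h1
        · exact hrest t' h1 hle hpw2
        · have : t' = t + 1 := by omega
          subst this
          rw [← hwin'] at hpw2 ⊢
          exact hc
      · intro h
        refine ⟨?_, fun t' ht' hle hpw2 => h t' (by omega) hle hpw2⟩
        rw [hwin']
        exact h (t + 1) (by omega) (by omega) (hwin' ▸ hpw')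
    · rw [if_neg hok]
      simp only [true_iff]
      intro t' ht' hle hpw2
      exfalso
      apply hok
      rw [pairsOK_iff]
      have hsub : (window ++ [x]).Sublist ((P.drop i).take t') := by
        rw [hwin']
        have : (P.drop i).take (t + 1) = ((P.drop i).take t').take (t + 1) := by
          rw [List.take_take]; congr 1; omega
        rw [this]
        exact List.take_sublist _ _
      have := hpw2.sublist hsub
      rw [List.pairwise_append] at this
      simpa using this.2.2

-- ===== VERDICT (by name: the statement is the Claim_ definition above) =====
theorem es_continua_spec : Claim_equal_es_continua := by
  intro P R f _ _
  show es_continua P R f = es_continua_alt P R f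
  apply bool_eq_of_iff
  rw [A_char]
  unfold es_continua_alt
  rw [List.all_eq_true]
  have key : ∀ (k : Nat), k < P.length →
      (bLoop P R (PySem.Dict.ofList f) [PySem.List.pyGetD P (k : Int) 0]
        (bUb P R (PySem.List.pyGetD P (k : Int) 0))
        (PySem.List.slice P (some ((k : Int) + 1)) none) = true ↔
      ∀ t', 1 < t' → k + t' ≤ P.length →
        ((P.drop k).take t').Pairwise (Cub P R) →
        condV P R (PySem.Dict.ofList f) ((P.drop k).take t') = true) := by
    intro k hk
    have hget : PySem.List.pyGetD P (k : Int) 0 = P[k]'hk := by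
      simp [PySem.List.pyGetD_natCast, List.getD_eq_getElem?_getD, List.getElem?_eq_getElem hk]
    have hslice : PySem.List.slice P (some ((k : Int) + 1)) none = P.drop (k + 1) := by
      have : ((k : Int) + 1) = ((k + 1 : Nat) : Int) := by push_cast; ring
      rw [this, PySem.List.slice_from_natCast]
    have hwin : [P[k]'hk] = (P.drop k).take 1 := by
      rw [List.take_succ]
      have : (P.drop k)[0]? = some (P[k]'hk) := by
        rw [List.getElem?_eq_getElem (by simp [List.length_drop]; omega)]
        simp [List.getElem_drop]
      simp [this]
    rw [hget, hslice]
    exact bLoop_iff P R (PySem.Dict.ofList f) (P.drop (k + 1)) _ _ k 1 hwin (by simp) le_rfl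
      rfl (fun c => by
        rw [mem_bUb]
        constructor
        · rintro ⟨hc, hr⟩; exact ⟨hc, by rintro a ha; simp at ha; subst ha; exact hr⟩
        · rintro ⟨hc, hall⟩; exact ⟨hc, hall _ (by simp)⟩)
      (by simp)
  constructor
  · intro h iI himem
    rw [PySem.List.mem_pyRange_one] at himem
    obtain ⟨k, rfl⟩ := Int.eq_ofNat_of_zero_le himem.1
    have hk : k < P.length := by exact_mod_cast himem.2
    rw [key k hk]
    intro t' ht' hle hpw
    exact h t' k (by omega) hle hpw
  · intro h t i h2 hit hpw
    have hi : (i : Int) ∈ PySem.List.pyRange 0 (P.length : Int) 1 := by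
      rw [PySem.List.mem_pyRange_one]
      constructor
      · omega
      · exact_mod_cast (by omega : i < P.length)
    have := h _ hi
    rw [key i (by omega)] at this
    exact this t (by omega) hit hpw
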